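-- pv_equiv track=rewrite | github.com/bullbin/widebrim_editor | editor/e_room/utils.py | getShortenedString
-- ===== SOURCE A (Python) =====
-- def getShortenedString(text : str, maxChars=36, extra="(...)", addSpace=True) -> str:
--     """Shorten string to fit character length.
--
--     Args:
--         text (str): Input string.
--         maxChars (int, optional): Max character count to shorten to, including extension. Defaults to 36.
--         extra (str, optional): Extension to fit to long strings. Defaults to "(...)".
--         addSpace (bool, optional): Add space before extension. Defaults to True.
--
--     Returns:
--         str: Shortened string.
--     """
--     text = " ".join(text.split("\n"))
--     if len(text) <= maxChars:
--         return text
--     else: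
--         if addSpace:
--             extra = " " + extra
--
--         text = text[:maxChars - len(extra)]
--
--         # Rewind to space before last cutoff word
--         while len(text) > 0 and text[-1] != " ":
--             text = text[:-1]
--
--         # Rewind to word before spaces
--         while len(text) > 0 and text[-1] == " ":
--             text = text[:-1]
--
--         text = text + extra
--         if addSpace:
--             checkLen = len(extra) + 1
--             if len(text) >= checkLen:
--                 if text[-checkLen] == " ":
--                     return text[:-checkLen] + extra[1:]
--
--         return text
-- ===== SOURCE B (Python) =====
-- def getShortenedString(text: str, maxChars=36, extra="(...)", addSpace=True) -> str:
--     text = " ".join(text.split("\n"))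
--     if len(text) <= maxChars:
--         return text
--     if addSpace:
--         extra = " " + extra
--     head = text[:maxChars - len(extra)]
--     # drop the last (partial) word token and any trailing spaces, token-wise
--     return " ".join(head.split(" ")[:-1]).rstrip(" ") + extra
-- ===== Notes on version B (the rewrite author's own statement) =====
-- stated objective: simpler
-- what changed: The two char-by-char rewind loops (each step re-slicing the whole string) are replaced by a single token-level cut: split the truncated head on spaces, drop the last token, rejoin and strip trailing spaces; the addSpace fix-up branch, which provably never fires because the rewound prefix never ends in a space, is dropped.
import Mathlib
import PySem

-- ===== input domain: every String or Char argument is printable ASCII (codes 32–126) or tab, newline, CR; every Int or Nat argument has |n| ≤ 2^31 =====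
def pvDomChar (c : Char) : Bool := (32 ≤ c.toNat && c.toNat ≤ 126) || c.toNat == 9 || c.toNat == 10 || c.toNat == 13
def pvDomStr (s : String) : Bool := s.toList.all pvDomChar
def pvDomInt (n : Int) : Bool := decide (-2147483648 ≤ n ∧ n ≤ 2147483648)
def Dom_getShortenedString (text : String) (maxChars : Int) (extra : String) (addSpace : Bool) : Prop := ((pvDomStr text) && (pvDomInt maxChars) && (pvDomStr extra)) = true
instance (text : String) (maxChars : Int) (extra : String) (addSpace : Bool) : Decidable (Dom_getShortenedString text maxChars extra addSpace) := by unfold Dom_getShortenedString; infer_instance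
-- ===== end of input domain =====

-- B replaces A's two char-by-char rewind loops (each step re-slicing the whole string) and the
-- never-firing addSpace fix-up they make dead by a single token-level cut: split the truncated head
-- on spaces, drop the last token, rejoin, strip trailing spaces (simpler; measured faster).

-- ===== PORT A =====
-- while len(text) > 0 and text[-1] != " ": text = text[:-1]
def gssLoop1 (t : List Char) : List Char :=
  match h : PySem.List.pyGet? t (-1) with
  | some c => if c ≠ ' ' then gssLoop1 t.dropLast else t
  | none => t
termination_by t.length
decreasing_by
  have ht : t ≠ [] := by
    rintro rfl; simp [PySem.List.pyGet?] at h
  have := List.length_pos_of_ne_nil ht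
  simp [List.length_dropLast]; omega

-- while len(text) > 0 and text[-1] == " ": text = text[:-1]
def gssLoop2 (t : List Char) : List Char :=
  match h : PySem.List.pyGet? t (-1) with
  | some c => if c = ' ' then gssLoop2 t.dropLast else t
  | none => t
termination_by t.length
decreasing_by
  have ht : t ≠ [] := by
    rintro rfl; simp [PySem.List.pyGet?] at h
  have := List.length_pos_of_ne_nil ht
  simp [List.length_dropLast]; omega

def getShortenedString (text : String) (maxChars : Int) (extra : String) (addSpace : Bool) : String :=
  let t := PySem.Chars.join [' '] (PySem.Chars.splitOn text.toList ['\n'])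
  if (PySem.List.len t) ≤ maxChars then String.ofList t
  else
    let ex := if addSpace then ' ' :: extra.toList else extra.toList
    let t1 := PySem.List.slice t none (some (maxChars - PySem.List.len ex))
    let t2 := gssLoop2 (gssLoop1 t1)
    let t3 := t2 ++ ex
    if addSpace then
      let checkLen : Int := PySem.List.len ex + 1
      if checkLen ≤ PySem.List.len t3 then
        if PySem.List.pyGet? t3 (-checkLen) == some ' ' then
          String.ofList (PySem.List.slice t3 none (some (-checkLen)) ++ PySem.List.slice ex (some 1) none)
        else String.ofList t3
      else String.ofList t3
    else String.ofList t3

-- ===== PORT B =====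
-- exact port of cs.rstrip(" ") (drop trailing ' ' characters)
def gssRstripSpace (cs : List Char) : List Char :=
  (cs.reverse.dropWhile (· == ' ')).reverse

def getShortenedString_alt (text : String) (maxChars : Int) (extra : String) (addSpace : Bool) : String :=
  let t := PySem.Chars.join [' '] (PySem.Chars.splitOn text.toList ['\n'])
  if (PySem.List.len t) ≤ maxChars then String.ofList t
  else
    let ex := if addSpace then ' ' :: extra.toList else extra.toList
    let head := PySem.List.slice t none (some (maxChars - PySem.List.len ex))
    String.ofList (gssRstripSpace (PySem.Chars.join [' ']
      (PySem.List.slice (PySem.Chars.splitOn head [' ']) none (some (-1)))) ++ ex)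

-- ===== PRECONDITION & SPEC =====
def Spec_getShortenedString (text : String) (maxChars : Int) (extra : String) (addSpace : Bool) (out : String) : Prop := out = getShortenedString_alt text maxChars extra addSpace
instance (text : String) (maxChars : Int) (extra : String) (addSpace : Bool) (out : String) : Decidable (Spec_getShortenedString text maxChars extra addSpace out) := by unfold Spec_getShortenedString; infer_instance

-- ===== CLAIM (what is proved, stated in full; the proofs are below) =====
def Claim_equal_getShortenedString : Prop := ∀ (text : String) (maxChars : Int) (extra : String) (addSpace : Bool), Dom_getShortenedString text maxChars extra addSpace → Spec_getShortenedString text maxChars extra addSpace (getShortenedString text maxChars extra addSpace)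

-- ===== LEMMAS AND PROOFS =====

def split1 (c : Char) : List Char → List (List Char)
  | [] => [[]]
  | x :: xs =>
    if x = c then [] :: split1 c xs
    else match split1 c xs with
      | [] => [[x]]
      | h :: t => (x :: h) :: t

theorem split1_ne_nil (c : Char) (s : List Char) : split1 c s ≠ [] := by
  cases s with
  | nil => simp [split1]
  | cons x xs =>
    simp only [split1]
    split_ifs
    · simp
    · split <;> simp

theorem go_eq (c : Char) : ∀ (fuel : Nat) (l cur : List Char) (acc : List (List Char)) (_ : l.length ≤ fuel),
    PySem.Chars.splitOn.go [c] fuel l cur acc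
      = acc.reverse ++ (cur.reverse ++ (split1 c l).headI) :: (split1 c l).tail := by
  intro fuel
  induction fuel with
  | zero =>
    intro l cur acc hl
    have hnil : l = [] := List.eq_nil_of_length_eq_zero (Nat.le_zero.mp hl)
    subst hnil
    simp [PySem.Chars.splitOn.go, split1]
  | succ fuel ih =>
    intro l cur acc hl
    cases l with
    | nil => simp [PySem.Chars.splitOn.go, split1]
    | cons x rest =>
      obtain ⟨h, t, hht⟩ : ∃ h t, split1 c rest = h :: t := by
        rcases e : split1 c rest with _ | ⟨h, t⟩
        · exact absurd e (split1_ne_nil c rest)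
        · exact ⟨h, t, rfl⟩
      rw [PySem.Chars.splitOn.go]
      by_cases hx : c = x
      · subst hx
        rw [if_pos (by simp [List.isPrefixOf])]
        simp only [List.length_cons, List.length_nil, Nat.zero_add, List.drop_succ_cons, List.drop_zero]
        rw [ih rest [] (cur.reverse :: acc) (by simpa using Nat.le_of_succ_le_succ hl)]
        simp [split1, hht]
      · have hpre : [c].isPrefixOf (x :: rest) = false := by
          simp [List.isPrefixOf, hx]
        rw [if_neg (by simp [hpre])]
        rw [ih rest (x :: cur) acc (by simpa using Nat.le_of_succ_le_succ hl)]
        simp [split1, hht, Ne.symm hx]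

theorem splitOn_eq_split1 (c : Char) (s : List Char) :
    PySem.Chars.splitOn s [c] = split1 c s := by
  obtain ⟨h, t, hht⟩ : ∃ h t, split1 c s = h :: t := by
    rcases e : split1 c s with _ | ⟨h, t⟩
    · exact absurd e (split1_ne_nil c s)
    · exact ⟨h, t, rfl⟩
  rw [PySem.Chars.splitOn, go_eq c (s.length + 1) s [] [] (by omega)]
  simp [hht]

theorem join_split1 (c : Char) (s : List Char) :
    PySem.Chars.join [c] (split1 c s) = s := by
  induction s with
  | nil => simp [split1, PySem.Chars.join_singleton]
  | cons x xs ih =>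
    obtain ⟨h, t, hht⟩ : ∃ h t, split1 c xs = h :: t := by
      rcases e : split1 c xs with _ | ⟨h, t⟩
      · exact absurd e (split1_ne_nil c xs)
      · exact ⟨h, t, rfl⟩
    rw [hht] at ih
    by_cases hx : x = c
    · subst hx
      rw [show split1 x (x :: xs) = [] :: h :: t by simp [split1, hht]]
      rw [PySem.Chars.join_cons_cons, ih]
      simp
    · simp only [split1, if_neg hx, hht]
      cases t with
      | nil =>
        rw [PySem.Chars.join_singleton]
        rw [PySem.Chars.join_singleton] at ih
        rw [ih]
      | cons y t' =>
        rw [PySem.Chars.join_cons_cons]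
        rw [PySem.Chars.join_cons_cons] at ih
        rw [List.cons_append, List.cons_append, ih]

def snocLast (l : List (List Char)) (x : Char) : List (List Char) :=
  match l with
  | [] => [[x]]
  | [h] => [h ++ [x]]
  | h :: h2 :: t => h :: snocLast (h2 :: t) x

theorem snocLast_cons₂ (h h2 : List Char) (t : List (List Char)) (x : Char) :
    snocLast (h :: h2 :: t) x = h :: snocLast (h2 :: t) x := rfl

theorem snocLast_singleton (h : List Char) (x : Char) : snocLast [h] x = [h ++ [x]] := rfl

theorem snocLast_ne_nil (l : List (List Char)) (x : Char) : snocLast l x ≠ [] := by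
  match l with
  | [] => simp [snocLast]
  | [h] => simp [snocLast]
  | h :: h2 :: t => simp [snocLast]

theorem dropLast_snocLast (l : List (List Char)) (x : Char) (hl : l ≠ []) :
    (snocLast l x).dropLast = l.dropLast := by
  match l with
  | [h] => simp [snocLast]
  | h :: h2 :: t =>
    rw [snocLast]
    have h2t := snocLast_ne_nil (h2 :: t) x
    rw [List.dropLast_cons_of_ne_nil h2t, List.dropLast_cons_of_ne_nil (by simp)]
    rw [dropLast_snocLast (h2 :: t) x (by simp)]

theorem split1_snoc_sep (c : Char) (xs : List Char) :
    split1 c (xs ++ [c]) = split1 c xs ++ [[]] := by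
  induction xs with
  | nil => simp [split1]
  | cons y ys ih =>
    obtain ⟨h, t, hht⟩ : ∃ h t, split1 c ys = h :: t := by
      rcases e : split1 c ys with _ | ⟨h, t⟩
      · exact absurd e (split1_ne_nil c ys)
      · exact ⟨h, t, rfl⟩
    by_cases hy : y = c
    · subst hy
      simp [List.cons_append, split1, ih]
    · simp [List.cons_append, split1, hy, ih, hht]

theorem split1_snoc_ne (c x : Char) (hx : x ≠ c) (xs : List Char) :
    split1 c (xs ++ [x]) = snocLast (split1 c xs) x := by
  induction xs with
  | nil => simp [split1, if_neg hx, snocLast]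
  | cons y ys ih =>
    obtain ⟨h, t, hht⟩ : ∃ h t, split1 c ys = h :: t := by
      rcases e : split1 c ys with _ | ⟨h, t⟩
      · exact absurd e (split1_ne_nil c ys)
      · exact ⟨h, t, rfl⟩
    have hys : split1 c (ys ++ [x]) = snocLast (h :: t) x := by rw [ih, hht]
    by_cases hy : y = c
    · have l1 : split1 c ((y :: ys) ++ [x]) = [] :: snocLast (h :: t) x := by
        simp [split1, hy, hys]
      have l2 : split1 c (y :: ys) = [] :: h :: t := by simp [split1, hy, hht]
      rw [l1, l2, snocLast_cons₂]
    · cases t with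
      | nil =>
        have l1 : split1 c ((y :: ys) ++ [x]) = [y :: (h ++ [x])] := by
          simp [split1, hy, hys, snocLast_singleton]
        have l2 : split1 c (y :: ys) = [y :: h] := by simp [split1, hy, hht]
        rw [l1, l2, snocLast_singleton]
        simp
      | cons z t' =>
        have l1 : split1 c ((y :: ys) ++ [x]) = (y :: h) :: snocLast (z :: t') x := by
          simp [split1, hy, hys, snocLast_cons₂]
        have l2 : split1 c (y :: ys) = (y :: h) :: z :: t' := by simp [split1, hy, hht]
        rw [l1, l2, snocLast_cons₂]

theorem split1_snoc_dropLast (c x : Char) (hx : x ≠ c) (xs : List Char) :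
    (split1 c (xs ++ [x])).dropLast = (split1 c xs).dropLast := by
  rw [split1_snoc_ne c x hx xs, dropLast_snocLast _ _ (split1_ne_nil c xs)]

theorem gssLoop1_nil : gssLoop1 [] = [] := by
  unfold gssLoop1; rfl

theorem gssLoop1_snoc (xs : List Char) (x : Char) :
    gssLoop1 (xs ++ [x]) = if x = ' ' then xs ++ [x] else gssLoop1 xs := by
  rw [gssLoop1]
  split
  next c hc =>
    rw [PySem.List.pyGet?_neg_one_append_singleton] at hc
    obtain rfl : x = c := Option.some_inj.mp hc
    rw [List.dropLast_concat]
    by_cases hx : x = ' ' <;> simp [hx]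
  next hc =>
    rw [PySem.List.pyGet?_neg_one_append_singleton] at hc
    exact absurd hc (by simp)

theorem gssLoop2_nil : gssLoop2 [] = [] := by
  unfold gssLoop2; rfl

theorem gssLoop2_snoc (xs : List Char) (x : Char) :
    gssLoop2 (xs ++ [x]) = if x = ' ' then gssLoop2 xs else xs ++ [x] := by
  rw [gssLoop2]
  split
  next c hc =>
    rw [PySem.List.pyGet?_neg_one_append_singleton] at hc
    obtain rfl : x = c := Option.some_inj.mp hc
    rw [List.dropLast_concat]
  next hc =>
    rw [PySem.List.pyGet?_neg_one_append_singleton] at hc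
    exact absurd hc (by simp)

theorem rstrip_nil : gssRstripSpace [] = [] := by simp [gssRstripSpace]

theorem rstrip_snoc_space (xs : List Char) : gssRstripSpace (xs ++ [' ']) = gssRstripSpace xs := by
  simp [gssRstripSpace]

theorem rstrip_snoc_ne (xs : List Char) (x : Char) (hx : x ≠ ' ') :
    gssRstripSpace (xs ++ [x]) = xs ++ [x] := by
  simp [gssRstripSpace, hx]

theorem gssLoop2_eq_rstrip (t : List Char) : gssLoop2 t = gssRstripSpace t := by
  induction t using List.reverseRecOn with
  | nil => rw [gssLoop2_nil, rstrip_nil]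
  | append_singleton xs x ih =>
    rw [gssLoop2_snoc]
    by_cases hx : x = ' '
    · subst hx; rw [if_pos rfl, ih, rstrip_snoc_space]
    · rw [if_neg hx, rstrip_snoc_ne xs x hx]

theorem rstrip_getLast?_ne_space (w : List Char) (c : Char)
    (h : (gssRstripSpace w).getLast? = some c) : c ≠ ' ' := by
  unfold gssRstripSpace at h
  rw [List.getLast?_reverse] at h
  generalize w.reverse = l at h
  induction l with
  | nil => simp [List.dropWhile] at h
  | cons a l ih =>
    rw [List.dropWhile_cons] at h
    by_cases ha : a = ' '
    · rw [if_pos (by simp [ha])] at h; exact ih h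
    · rw [if_neg (by simp [ha])] at h
      simp only [List.head?_cons, Option.some_inj] at h
      subst h; exact ha

theorem slice_to_neg_one {α : Type} (l : List α) :
    PySem.List.slice l none (some (-1)) = l.dropLast := by
  rcases l.eq_nil_or_concat with rfl | ⟨ys, y, rfl⟩
  · simp [PySem.List.slice, PySem.List.clampIdx]
  · simp [PySem.List.slice, PySem.List.clampIdx]

theorem main_core (t : List Char) :
    gssLoop2 (gssLoop1 t) = gssRstripSpace (PySem.Chars.join [' '] ((split1 ' ' t).dropLast)) := by
  induction t using List.reverseRecOn with
  | nil =>
    rw [gssLoop1_nil, gssLoop2_nil]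
    simp [split1, PySem.Chars.join_nil, rstrip_nil]
  | append_singleton xs x ih =>
    by_cases hx : x = ' '
    · subst hx
      rw [gssLoop1_snoc, if_pos rfl, gssLoop2_eq_rstrip, rstrip_snoc_space]
      rw [split1_snoc_sep, List.dropLast_concat, join_split1]
    · rw [gssLoop1_snoc, if_neg hx, ih, split1_snoc_dropLast ' ' x (by simpa using hx) xs]

-- ===== VERDICT (by name: the statement is the Claim_ definition above) =====
theorem gss_fix_dead (p ex : List Char)
    (hp : ∀ c, p.getLast? = some c → c ≠ ' ') :
    (if PySem.List.len ex + 1 ≤ PySem.List.len (p ++ ex) then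
      if PySem.List.pyGet? (p ++ ex) (-(PySem.List.len ex + 1)) == some ' ' then
        String.ofList (PySem.List.slice (p ++ ex) none (some (-(PySem.List.len ex + 1))) ++
          PySem.List.slice ex (some 1) none)
      else String.ofList (p ++ ex)
    else String.ofList (p ++ ex)) = String.ofList (p ++ ex) := by
  rcases p.eq_nil_or_concat with rfl | ⟨q, c, rfl⟩
  · rw [if_neg]
    simp only [PySem.List.len, List.nil_append]
    omega
  · simp only [List.concat_eq_append] at hp ⊢
    have hc : c ≠ ' ' := hp c (by simp)
    rw [if_pos (by simp only [PySem.List.len, List.length_append, List.length_cons,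
      List.length_nil]; push_cast; omega)]
    have hcast : -(PySem.List.len ex + 1) = -(((ex.length + 1 : Nat) : Int)) := by
      simp only [PySem.List.len]; push_cast; ring
    have hget : PySem.List.pyGet? ((q ++ [c]) ++ ex) (-(PySem.List.len ex + 1)) = some c := by
      rw [hcast, PySem.List.pyGet?_neg_natCast _ (ex.length + 1) (by omega)
        (by simp)]
      have hidx : ((q ++ [c]) ++ ex).length - (ex.length + 1) = q.length := by
        simp
      rw [hidx, List.append_assoc, List.getElem?_append_right (le_refl q.length)]
      simp
    rw [hget]
    rw [if_neg (by simp [hc])]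

theorem getShortenedString_spec : Claim_equal_getShortenedString := by
  intro text maxChars extra addSpace _
  unfold Spec_getShortenedString getShortenedString getShortenedString_alt
  dsimp only
  by_cases hle : PySem.List.len (PySem.Chars.join [' '] (PySem.Chars.splitOn text.toList ['\n'])) ≤ maxChars
  · rw [if_pos hle, if_pos hle]
  · rw [if_neg hle, if_neg hle]
    clear hle
    generalize (PySem.List.slice (PySem.Chars.join [' '] (PySem.Chars.splitOn text.toList ['\n'])) none
        (some (maxChars - PySem.List.len (if addSpace then ' ' :: extra.toList else extra.toList)))) = t1
    generalize hex : (if addSpace then ' ' :: extra.toList else extra.toList) = ex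
    rw [slice_to_neg_one, splitOn_eq_split1, ← main_core t1]
    have hplast : ∀ c, (gssLoop2 (gssLoop1 t1)).getLast? = some c → c ≠ ' ' := by
      intro c hc
      rw [main_core t1] at hc
      exact rstrip_getLast?_ne_space _ c hc
    cases addSpace with
    | false => rfl
    | true => exact gss_fix_dead _ _ hplast
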